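-- pv_equiv track=rewrite | github.com/pascalaldo/biggr_models | biggr_models/handlers/utils.py | format_gene_reaction_rule
-- ===== SOURCE A (Python) =====
-- def format_gene_reaction_rule(grr: str) -> str:
--     """Format a Gene Reaction Rule."""
--     s = grr.replace("(", " ( ").replace(")", " ) ")
--     s = [xs for x in s.split(" ") if (xs := x.strip()) != ""]
--     s = [
--         (
--             x
--             if x in [")", "(", "or", "and", "OR", "AND"]
--             else f"<span class='fw-semibold'>{x}</span>"
--         )
--         for x in s
--     ]
--     res = " "
--     for x in s:
--         if x == ")" or res[-1] in " (":
--             res = f"{res}{x}"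
--         else:
--             res = f"{res} {x}"
--
--     return res.strip()
-- ===== SOURCE B (Python) =====
-- def format_gene_reaction_rule(grr: str) -> str:
--     """Format a Gene Reaction Rule."""
--     ops = (")", "(", "or", "and", "OR", "AND")
--     tokens = []
--     cur = ""
--     for ch in grr + " ":
--         if ch in "() ":
--             w = cur.strip()
--             if w:
--                 tokens.append(w)
--             cur = ""
--             if ch != " ":
--                 tokens.append(ch)
--         else:
--             cur += ch
--     parts = []
--     prev = ""
--     for t in tokens:
--         if parts and t != ")" and prev != "(":
--             parts.append(" ")
--         parts.append(
--             t if t in ops else f"<span class='fw-semibold'>{t}</span>"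
--         )
--         prev = t
--     return "".join(parts)
-- ===== Notes on version B (the rewrite author's own statement) =====
-- stated objective: alternative
-- what changed: Replaces A's four-stage pipeline (pad parens via two replaces, split on space, strip/drop pieces, wrap, then an accumulator loop that inspects the last character of the growing result and finally strips) by a single character-level scan that builds the stripped token list directly, followed by an emit loop that decides spacing from the previous raw token and joins the parts once.
import Mathlib
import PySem

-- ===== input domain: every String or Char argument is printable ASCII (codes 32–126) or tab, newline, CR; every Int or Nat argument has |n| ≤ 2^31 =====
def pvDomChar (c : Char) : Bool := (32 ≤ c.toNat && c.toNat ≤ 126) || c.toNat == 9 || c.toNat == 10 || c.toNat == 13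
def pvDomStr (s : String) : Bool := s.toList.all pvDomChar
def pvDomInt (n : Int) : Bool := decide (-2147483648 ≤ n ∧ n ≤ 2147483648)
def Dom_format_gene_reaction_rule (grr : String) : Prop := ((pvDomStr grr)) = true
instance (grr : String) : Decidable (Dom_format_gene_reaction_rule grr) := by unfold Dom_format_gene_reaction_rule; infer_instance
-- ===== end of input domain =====

-- B replaces A's pad-replace/split/strip/map/accumulator pipeline by a single character-level
-- scan that builds tokens directly, then an emit loop deciding spacing from the previous raw
-- token; same return value, a genuinely different decomposition (objective: alternative).


-- ===== PORT A =====
def format_gene_reaction_rule (grr : String) : String :=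
  let s1 : List Char := PySem.Chars.replace (PySem.Chars.replace grr.toList ['('] " ( ".toList) [')'] " ) ".toList
  let toks : List (List Char) := (PySem.Chars.splitOn s1 [' ']).filterMap
      (fun x => let xs := PySem.Chars.strip x; if xs = [] then none else some xs)
  let toks2 : List (List Char) := toks.map (fun x =>
      if x = [')'] ∨ x = ['('] ∨ x = "or".toList ∨ x = "and".toList ∨ x = "OR".toList ∨ x = "AND".toList
      then x else "<span class='fw-semibold'>".toList ++ x ++ "</span>".toList)
  let res : List Char := toks2.foldl (fun res x =>
      if x = [')'] ∨ res.getLast? = some ' ' ∨ res.getLast? = some '(' then res ++ x else res ++ ' ' :: x) [' ']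
  String.ofList (PySem.Chars.strip res)

-- ===== PORT B =====
-- B's span wrapping of one raw token (the `t if t in ops else f"<span …>{t}</span>"` expression)
def pvWrap (t : List Char) : List Char :=
  if t = [')'] ∨ t = ['('] ∨ t = "or".toList ∨ t = "and".toList ∨ t = "OR".toList ∨ t = "AND".toList
  then t else "<span class='fw-semibold'>".toList ++ t ++ "</span>".toList

-- body of B's first loop: state = (tokens so far, current chunk)
def pvScanStep (st : List (List Char) × List Char) (ch : Char) : List (List Char) × List Char :=
  if ch = '(' ∨ ch = ')' ∨ ch = ' ' then
    (let w := PySem.Chars.strip st.2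
     let toks := if w = [] then st.1 else st.1 ++ [w]
     if ch ≠ ' ' then toks ++ [[ch]] else toks, [])
  else (st.1, st.2 ++ [ch])

-- body of B's second loop: state = (output parts, previous raw token; "" ported as [])
def pvEmitStep (st : List (List Char) × List Char) (t : List Char) : List (List Char) × List Char :=
  ((if st.1 ≠ [] ∧ t ≠ [')'] ∧ st.2 ≠ ['('] then st.1 ++ [[' ']] else st.1) ++ [pvWrap t], t)

def format_gene_reaction_rule_alt (grr : String) : String :=
  let tokens : List (List Char) := ((grr.toList ++ [' ']).foldl pvScanStep ([], [])).1
  String.ofList ((tokens.foldl pvEmitStep ([], [])).1).flatten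

-- ===== PRECONDITION & SPEC =====
def Spec_format_gene_reaction_rule (grr : String) (out : String) : Prop := out = format_gene_reaction_rule_alt grr
instance (grr : String) (out : String) : Decidable (Spec_format_gene_reaction_rule grr out) := by unfold Spec_format_gene_reaction_rule; infer_instance

-- ===== CLAIM (what is proved, stated in full; the proofs are below) =====
def Claim_equal_format_gene_reaction_rule : Prop := ∀ (grr : String), Dom_format_gene_reaction_rule grr → Spec_format_gene_reaction_rule grr (format_gene_reaction_rule grr)

-- ===== LEMMAS AND PROOFS =====

-- per-character expansion performed by A's two paren-padding replaces
def pvF (c : Char) : List Char :=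
  if c = '(' then [' ', '(', ' '] else if c = ')' then [' ', ')', ' '] else [c]

-- split on a single space
def pvSplit : List Char → List (List Char)
  | [] => [[]]
  | c :: r => if c = ' ' then [] :: pvSplit r else (pvSplit r).modifyHead (c :: ·)

-- A's strip-and-drop-empties step, as a filterMap function
def pvFstrip (x : List Char) : Option (List Char) :=
  if PySem.Chars.strip x = [] then none else some (PySem.Chars.strip x)

-- list form of pvFstrip (what one piece contributes)
def pvFl (x : List Char) : List (List Char) :=
  if PySem.Chars.strip x = [] then [] else [PySem.Chars.strip x]

-- recursion computed by B's scan loop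
def pvG : List Char → List Char → List (List Char)
  | [], _ => []
  | ch :: r, cur =>
    if ch = '(' ∨ ch = ')' ∨ ch = ' ' then
      pvFl cur ++ (if ch ≠ ' ' then [[ch]] else []) ++ pvG r []
    else pvG r (cur ++ [ch])

-- recursion computed by B's emit loop, tail part (prev = previous RAW token)
def pvEmitR : List Char → List (List Char) → List Char
  | _, [] => []
  | prev, t :: r => (if t = [')'] ∨ prev = ['('] then pvWrap t else ' ' :: pvWrap t) ++ pvEmitR t r

-- the spacing A's loop produces over WRAPPED tokens, tail part (prev = previous wrapped token)
def pvHH : List Char → List (List Char) → List Char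
  | _, [] => []
  | prev, u :: r => (if u = [')'] ∨ prev = ['('] then u else ' ' :: u) ++ pvHH u r

def pvGG : List (List Char) → List Char
  | [] => []
  | t :: r => t ++ pvHH t r

-- what every wrapped token satisfies
def pvGoodTok (t : List Char) : Prop :=
  t ≠ [] ∧ (t = ['('] ∨ '(' ∉ t) ∧
  (t.head?.all fun c => !(PySem.Chars.isspace c)) = true ∧
  (t.getLast?.all fun c => !(PySem.Chars.isspace c)) = true

-- what every stripped raw token satisfies (before the span wrapping)
def pvRawGood (t : List Char) : Prop :=
  t ≠ [] ∧ (t = ['('] ∨ '(' ∉ t) ∧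
  (t.head?.all fun c => !(PySem.Chars.isspace c)) = true ∧
  (t.getLast?.all fun c => !(PySem.Chars.isspace c)) = true

theorem pv_modifyHead_trivial (L : List (List Char)) : L.modifyHead (fun x => x) = L := by
  cases L <;> simp

-- ---------- A's replace ↔ pvF ----------

theorem pv_rep_go_single (c : Char) (new : List Char) :
    ∀ (fuel : Nat) (l acc : List Char), l.length ≤ fuel →
    PySem.Chars.replace.go [c] new fuel l acc
      = acc.reverse ++ l.flatMap (fun a => if a = c then new else [a]) := by
  intro fuel
  induction fuel with
  | zero =>
    intro l acc h
    have : l = [] := List.eq_nil_of_length_eq_zero (Nat.le_zero.mp h)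
    subst this
    simp [PySem.Chars.replace.go]
  | succ n ih =>
    intro l acc h
    cases l with
    | nil => simp [PySem.Chars.replace.go]
    | cons a t =>
      by_cases hac : c = a
      · subst hac
        simp only [PySem.Chars.replace.go, List.isPrefixOf, BEq.rfl, Bool.true_and,
          if_true, List.length_cons, List.length_nil, List.drop_succ_cons, List.drop_zero]
        rw [ih t (new.reverse ++ acc) (Nat.le_of_succ_le_succ h)]
        simp
      · have hpre : ([c].isPrefixOf (a :: t)) = false := by
          simp [List.isPrefixOf]
          exact hac
        simp only [PySem.Chars.replace.go, hpre, Bool.false_eq_true, if_false]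
        rw [ih t (a :: acc) (Nat.le_of_succ_le_succ h)]
        have : ¬ (a = c) := fun hh => hac hh.symm
        simp [this]

theorem pv_rep_single (s : List Char) (c : Char) (new : List Char) :
    PySem.Chars.replace s [c] new = s.flatMap (fun a => if a = c then new else [a]) := by
  unfold PySem.Chars.replace
  rw [if_neg (by simp)]
  rw [pv_rep_go_single c new s.length s [] (Nat.le_refl _)]
  simp

theorem pv_pad_eq (s : List Char) :
    PySem.Chars.replace (PySem.Chars.replace s ['('] " ( ".toList) [')'] " ) ".toList
      = s.flatMap pvF := by
  rw [pv_rep_single, pv_rep_single]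
  induction s with
  | nil => simp
  | cons c s ih =>
    rw [List.flatMap_cons, List.flatMap_append, ih, List.flatMap_cons]
    congr 1
    by_cases h1 : c = '('
    · subst h1; decide
    · by_cases h2 : c = ')'
      · subst h2; decide
      · simp [pvF, h1, h2]

-- ---------- A's splitOn ↔ pvSplit ----------

theorem pv_split_go :
    ∀ (fuel : Nat) (l cur : List Char) (acc : List (List Char)), l.length < fuel →
    PySem.Chars.splitOn.go [' '] fuel l cur acc
      = acc.reverse ++ (pvSplit l).modifyHead (cur.reverse ++ ·) := by
  intro fuel
  induction fuel with
  | zero => exact fun l cur acc h => absurd h (by omega)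
  | succ n ih =>
    intro l cur acc h
    cases l with
    | nil => simp [PySem.Chars.splitOn.go, pvSplit]
    | cons a t =>
      by_cases ha : a = ' '
      · subst ha
        have hpre : ([' '].isPrefixOf (' ' :: t)) = true := by simp [List.isPrefixOf]
        simp only [PySem.Chars.splitOn.go, hpre, if_true, List.length_cons, List.length_nil,
          List.drop_succ_cons, List.drop_zero]
        rw [ih t [] (cur.reverse :: acc) (by simp at h ⊢; omega)]
        simp [pvSplit, pv_modifyHead_trivial]
      · have hpre : ([' '].isPrefixOf (a :: t)) = false := by
          simp [List.isPrefixOf]; exact fun hh => ha hh.symm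
        simp only [PySem.Chars.splitOn.go, hpre, Bool.false_eq_true, if_false]
        rw [ih t (a :: cur) acc (by simp at h ⊢; omega)]
        simp [pvSplit, ha, List.modifyHead_modifyHead]
        rfl

theorem pv_split_eq (s : List Char) : PySem.Chars.splitOn s [' '] = pvSplit s := by
  unfold PySem.Chars.splitOn
  rw [pv_split_go (s.length + 1) s [] [] (by omega)]
  simp [pv_modifyHead_trivial]

-- ---------- pieces of the split are clean ----------

theorem pv_split_shape (s : List Char) : ∃ q qs, pvSplit s = q :: qs := by
  induction s with
  | nil => exact ⟨[], [], rfl⟩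
  | cons c r ih =>
    obtain ⟨q, qs, hq⟩ := ih
    by_cases hc : c = ' '
    · exact ⟨[], pvSplit r, by simp [pvSplit, hc]⟩
    · exact ⟨c :: q, qs, by simp [pvSplit, hc, hq]⟩

theorem pv_pieces (s : List Char) :
    (∀ p ∈ pvSplit (s.flatMap pvF), p = ['('] ∨ p = [')'] ∨ ('(' ∉ p ∧ ')' ∉ p)) ∧
    (∀ q qs, pvSplit (s.flatMap pvF) = q :: qs → '(' ∉ q ∧ ')' ∉ q) := by
  induction s with
  | nil =>
    constructor
    · intro p hp; simp [pvSplit] at hp; simp [hp]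
    · intro q qs h; simp [pvSplit] at h; simp [h.1]
  | cons c r ih =>
    obtain ⟨q, qs, hq⟩ := pv_split_shape (r.flatMap pvF)
    have hqp : '(' ∉ q ∧ ')' ∉ q := ih.2 q qs hq
    by_cases h1 : c = '('
    · subst h1
      have : pvSplit (('(' :: r).flatMap pvF) = [] :: ['('] :: pvSplit (r.flatMap pvF) := by
        simp [pvF, pvSplit]
      rw [this]
      constructor
      · intro p hp
        rcases List.mem_cons.mp hp with h | hp
        · subst h; simp
        · rcases List.mem_cons.mp hp with h | hp
          · subst h; simp
          · exact ih.1 p hp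
      · intro a as h
        injection h with h1 _
        subst h1; simp
    · by_cases h2 : c = ')'
      · subst h2
        have : pvSplit ((')' :: r).flatMap pvF) = [] :: [')'] :: pvSplit (r.flatMap pvF) := by
          simp [pvF, pvSplit]
        rw [this]
        constructor
        · intro p hp
          rcases List.mem_cons.mp hp with h | hp
          · subst h; simp
          · rcases List.mem_cons.mp hp with h | hp
            · subst h; simp
            · exact ih.1 p hp
        · intro a as h
          injection h with h1 _
          subst h1; simp
      · by_cases h3 : c = ' '
        · subst h3
          have : pvSplit ((' ' :: r).flatMap pvF) = [] :: pvSplit (r.flatMap pvF) := by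
            simp [pvF, pvSplit]
          rw [this]
          constructor
          · intro p hp
            rcases List.mem_cons.mp hp with h | hp
            · subst h; simp
            · exact ih.1 p hp
          · intro a as h
            injection h with h1 _
            subst h1; simp
        · have : pvSplit ((c :: r).flatMap pvF) = (c :: q) :: qs := by
            simp [pvF, h1, h2, pvSplit, h3, hq]
          rw [this]
          constructor
          · intro p hp
            rcases List.mem_cons.mp hp with h | hp
            · subst h
              right; right
              constructor
              · intro hmem
                rcases List.mem_cons.mp hmem with h | h
                · exact h1 h.symm
                · exact hqp.1 h
              · intro hmem
                rcases List.mem_cons.mp hmem with h | h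
                · exact h2 h.symm
                · exact hqp.2 h
            · exact ih.1 p (by simp [hq, hp])
          · intro a as h
            injection h with ha _
            subst ha
            constructor
            · intro hmem
              rcases List.mem_cons.mp hmem with h | h
              · exact h1 h.symm
              · exact hqp.1 h
            · intro hmem
              rcases List.mem_cons.mp hmem with h | h
              · exact h2 h.symm
              · exact hqp.2 h

-- ---------- strip ----------

theorem pv_strip_sublist (x : List Char) : (PySem.Chars.strip x).Sublist x := by
  unfold PySem.Chars.strip PySem.Chars.rstrip PySem.Chars.lstrip
  have h1 : (List.dropWhile PySem.Chars.isspace x).Sublist x := List.dropWhile_sublist _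
  have h2 : (List.dropWhile PySem.Chars.isspace
      (List.dropWhile PySem.Chars.isspace x).reverse).Sublist
      (List.dropWhile PySem.Chars.isspace x).reverse := List.dropWhile_sublist _
  have h3 := h2.reverse
  simp only [List.reverse_reverse] at h3
  exact h3.trans h1

theorem pv_head_dropWhile (p : Char → Bool) :
    ∀ (l : List Char) (c : Char) (cs : List Char), l.dropWhile p = c :: cs → p c = false := by
  intro l
  induction l with
  | nil => intro c cs h; simp [List.dropWhile] at h
  | cons a t ih =>
    intro c cs h
    by_cases hp : p a
    · rw [List.dropWhile_cons_of_pos hp] at h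
      exact ih c cs h
    · rw [List.dropWhile_cons_of_neg hp] at h
      injection h with h1 _
      subst h1
      simpa using hp

theorem pv_strip_head (x : List Char) :
    ((PySem.Chars.strip x).head?.all fun c => !(PySem.Chars.isspace c)) = true := by
  unfold PySem.Chars.strip
  cases hs : PySem.Chars.rstrip (PySem.Chars.lstrip x) with
  | nil => simp
  | cons c cs =>
    have hpre : (c :: cs) <+: PySem.Chars.lstrip x := by
      rw [← hs]
      unfold PySem.Chars.rstrip
      have := List.dropWhile_suffix (l := (PySem.Chars.lstrip x).reverse) (p := PySem.Chars.isspace)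
      have h2 := this.reverse
      simpa using h2
    obtain ⟨t, ht⟩ := hpre
    have : PySem.Chars.lstrip x = c :: (cs ++ t) := by rw [← ht]; simp
    have hc := pv_head_dropWhile PySem.Chars.isspace x c (cs ++ t) this
    simp [hc]

theorem pv_strip_last (x : List Char) :
    ((PySem.Chars.strip x).getLast?.all fun c => !(PySem.Chars.isspace c)) = true := by
  unfold PySem.Chars.strip PySem.Chars.rstrip
  cases hs : List.dropWhile PySem.Chars.isspace (PySem.Chars.lstrip x).reverse with
  | nil => simp
  | cons c cs =>
    have hc := pv_head_dropWhile PySem.Chars.isspace _ c cs hs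
    have hg : (c :: cs).reverse.getLast? = some c := by simp
    rw [hg]
    simp [hc]

-- stripped nonempty pieces are raw-good tokens
theorem pv_tok_raw (s : List Char) :
    ∀ t ∈ ((pvSplit (s.flatMap pvF)).filterMap pvFstrip), pvRawGood t := by
  intro t ht
  rw [List.mem_filterMap] at ht
  obtain ⟨x, hx, hfx⟩ := ht
  unfold pvFstrip at hfx
  by_cases hemp : PySem.Chars.strip x = []
  · simp [hemp] at hfx
  · rw [if_neg hemp] at hfx
    injection hfx with hfx
    subst hfx
    have hsub := pv_strip_sublist x
    refine ⟨hemp, ?_, pv_strip_head x, pv_strip_last x⟩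
    rcases (pv_pieces s).1 x hx with h | h | h
    · subst h; left; decide
    · subst h; right; decide
    · exact Or.inr (fun hm => h.1 (hsub.mem hm))

theorem pv_getLast?_append (a b : List Char) (hb : b ≠ []) : (a ++ b).getLast? = b.getLast? := by
  rw [← List.head?_reverse, ← List.head?_reverse, List.reverse_append]
  exact List.head?_append_of_ne_nil _ (by simpa using hb)

theorem pv_head?_append (a b : List Char) (ha : a ≠ []) : (a ++ b).head? = a.head? :=
  List.head?_append_of_ne_nil _ ha

-- the wrapped tokens are good
theorem pv_wrap_good (t : List Char) (h : pvRawGood t) : pvGoodTok (pvWrap t) := by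
  obtain ⟨hne, hp1, hh, hl⟩ := h
  unfold pvWrap
  by_cases hop : t = [')'] ∨ t = ['('] ∨ t = "or".toList ∨ t = "and".toList ∨ t = "OR".toList ∨ t = "AND".toList
  · rw [if_pos hop]
    rcases hop with h | h | h | h | h | h <;> subst h <;>
      exact ⟨by decide, by decide, by decide, by decide⟩
  · rw [if_neg hop]
    have hnp1 : '(' ∉ t := by
      rcases hp1 with h | h
      · exact absurd (Or.inr (Or.inl h)) hop
      · exact h
    refine ⟨by simp, ?_, ?_, ?_⟩
    · right
      intro hm
      simp only [List.append_assoc, List.mem_append] at hm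
      rcases hm with hm | hm | hm
      · revert hm; decide
      · exact hnp1 hm
      · revert hm; decide
    · rw [List.append_assoc, pv_head?_append _ _ (by decide)]
      decide
    · rw [pv_getLast?_append _ _ (by decide)]
      decide

-- ---------- A's loop ----------

theorem pv_good_last_iff (t : List Char) (h : pvGoodTok t) :
    (t.getLast? = some ' ' ∨ t.getLast? = some '(') ↔ t = ['('] := by
  obtain ⟨hne, hp1, _, hl⟩ := h
  constructor
  · rintro (hc | hc)
    · rw [hc] at hl; simp [PySem.Chars.isspace] at hl
    · have hmem : '(' ∈ t := by
        have := List.getLast?_eq_some_iff.mp hc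
        obtain ⟨l', hl'⟩ := this
        rw [hl']; simp
      rcases hp1 with h | h
      · exact h
      · exact absurd hmem h
  · intro h; subst h; right; rfl

theorem pv_foldA : ∀ (ts : List (List Char)) (prev res : List Char),
    (∀ t ∈ ts, pvGoodTok t) → pvGoodTok prev → res ≠ [] → res.getLast? = prev.getLast? →
    List.foldl (fun res x =>
        if x = [')'] ∨ res.getLast? = some ' ' ∨ res.getLast? = some '(' then res ++ x else res ++ ' ' :: x) res ts
      = res ++ pvHH prev ts := by
  intro ts
  induction ts with
  | nil => intro prev res _ _ _ _; simp [pvHH]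
  | cons t r ih =>
    intro prev res hgood hprev hres hlast
    have hgt : pvGoodTok t := hgood t (by simp)
    have hcond : (t = [')'] ∨ res.getLast? = some ' ' ∨ res.getLast? = some '(')
        ↔ (t = [')'] ∨ prev = ['(']) := by
      rw [hlast]
      constructor
      · rintro (h | h)
        · exact Or.inl h
        · exact Or.inr ((pv_good_last_iff prev hprev).mp h)
      · rintro (h | h)
        · exact Or.inl h
        · exact Or.inr ((pv_good_last_iff prev hprev).mpr h)
    simp only [List.foldl_cons]
    by_cases hc : t = [')'] ∨ prev = ['(']
    · rw [if_pos (hcond.mpr hc)]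
      rw [ih t (res ++ t) (fun u hu => hgood u (by simp [hu])) hgt
        (by simp [hgt.1]) (pv_getLast?_append _ _ hgt.1)]
      simp [pvHH, hc]
    · rw [if_neg (fun hx => hc (hcond.mp hx))]
      rw [ih t (res ++ ' ' :: t) (fun u hu => hgood u (by simp [hu])) hgt
        (by simp)
        (by rw [show res ++ ' ' :: t = res ++ ([' '] ++ t) from by simp,
              pv_getLast?_append _ _ (by simp), pv_getLast?_append _ _ hgt.1])]
      simp [pvHH, hc]

theorem pv_lstrip_id (X : List Char) (h : (X.head?.all fun c => !(PySem.Chars.isspace c)) = true) :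
    PySem.Chars.lstrip X = X := by
  cases X with
  | nil => rfl
  | cons c cs =>
    simp only [List.head?_cons, Option.all_some] at h
    unfold PySem.Chars.lstrip
    rw [List.dropWhile_cons_of_neg (by simpa using h)]

theorem pv_rstrip_id (X : List Char) (h : (X.getLast?.all fun c => !(PySem.Chars.isspace c)) = true) :
    PySem.Chars.rstrip X = X := by
  unfold PySem.Chars.rstrip
  cases hx : X.reverse with
  | nil => simp [List.reverse_eq_nil_iff.mp hx]
  | cons c ys =>
    have hc : X.getLast? = some c := by rw [← List.head?_reverse, hx]; rfl
    rw [hc] at h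
    simp only [Option.all_some] at h
    rw [List.dropWhile_cons_of_neg (by simpa using h)]
    rw [← hx, List.reverse_reverse]

theorem pv_hh_last (r : List (List Char)) :
    ∀ (prev s : List Char), (∀ t ∈ r, pvGoodTok t) → s ≠ [] →
    (s.getLast?.all fun c => !(PySem.Chars.isspace c)) = true →
    ((s ++ pvHH prev r).getLast?.all fun c => !(PySem.Chars.isspace c)) = true := by
  induction r with
  | nil => intro prev s _ _ hlast; simpa [pvHH] using hlast
  | cons u r' ih =>
    intro prev s hgood hs hlast
    have hgu : pvGoodTok u := hgood u (by simp)
    have := ih u (s ++ (if u = [')'] ∨ prev = ['('] then u else ' ' :: u))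
      (fun t ht => hgood t (by simp [ht])) (by split <;> simp [hgu.1, hs])
      (by
        split
        · rw [pv_getLast?_append _ _ hgu.1]
          exact hgu.2.2.2
        · rw [show s ++ ' ' :: u = s ++ ([' '] ++ u) from by simp,
            pv_getLast?_append _ _ (by simp), pv_getLast?_append _ _ hgu.1]
          exact hgu.2.2.2)
    simpa [pvHH, List.append_assoc] using this

theorem pv_strip_space_gg (ts : List (List Char)) (h : ∀ t ∈ ts, pvGoodTok t) :
    PySem.Chars.strip (' ' :: pvGG ts) = pvGG ts := by
  cases ts with
  | nil => decide
  | cons t r =>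
    have hgt : pvGoodTok t := h t (by simp)
    have hgg : pvGG (t :: r) = t ++ pvHH t r := rfl
    have hhead : ((pvGG (t :: r)).head?.all fun c => !(PySem.Chars.isspace c)) = true := by
      rw [hgg, pv_head?_append _ _ hgt.1]
      exact hgt.2.2.1
    have hlast : ((pvGG (t :: r)).getLast?.all fun c => !(PySem.Chars.isspace c)) = true := by
      rw [hgg]
      exact pv_hh_last r t t (fun u hu => h u (by simp [hu])) hgt.1 hgt.2.2.2
    unfold PySem.Chars.strip
    rw [show PySem.Chars.lstrip (' ' :: pvGG (t :: r)) = PySem.Chars.lstrip (pvGG (t :: r)) from by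
        unfold PySem.Chars.lstrip
        rw [List.dropWhile_cons_of_pos (by decide)]]
    rw [pv_lstrip_id _ hhead, pv_rstrip_id _ hlast]

-- ---------- B's scan loop ----------

theorem pv_scanB : ∀ (l : List Char) (toks : List (List Char)) (cur : List Char),
    ((l.foldl pvScanStep (toks, cur))).1 = toks ++ pvG l cur := by
  intro l
  induction l with
  | nil => intro toks cur; simp [pvG]
  | cons ch r ih =>
    intro toks cur
    by_cases hd : ch = '(' ∨ ch = ')' ∨ ch = ' '
    · simp only [List.foldl_cons]
      rw [show pvScanStep (toks, cur) ch
          = (toks ++ (pvFl cur ++ (if ch ≠ ' ' then [[ch]] else [])), []) from by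
        unfold pvScanStep pvFl
        rw [if_pos hd]
        by_cases hw : PySem.Chars.strip cur = [] <;> by_cases hsp : ch = ' ' <;>
          simp [hw, hsp]]
      rw [ih]
      simp [pvG, hd]
    · simp only [List.foldl_cons]
      rw [show pvScanStep (toks, cur) ch = (toks, cur ++ [ch]) from by
        unfold pvScanStep
        rw [if_neg hd]]
      rw [ih]
      simp [pvG, hd]

theorem pv_filterMap_cons (q : List Char) (qs : List (List Char)) :
    (q :: qs).filterMap pvFstrip = pvFl q ++ qs.filterMap pvFstrip := by
  by_cases h : PySem.Chars.strip q = [] <;> simp [pvFstrip, pvFl, h]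

theorem pv_scan_split : ∀ (s cur : List Char),
    pvG (s ++ [' ']) cur
      = ((pvSplit (s.flatMap pvF)).modifyHead (fun q => cur ++ q)).filterMap pvFstrip := by
  intro s
  induction s with
  | nil =>
    intro cur
    simp [pvG, pvSplit, pv_filterMap_cons]
  | cons c r ih =>
    intro cur
    by_cases h1 : c = '('
    · subst h1
      have hsp : pvSplit (('(' :: r).flatMap pvF) = [] :: ['('] :: pvSplit (r.flatMap pvF) := by
        simp [pvF, pvSplit]
      rw [hsp]
      have hg : pvG (('(' :: r) ++ [' ']) cur
          = pvFl cur ++ [['(']] ++ pvG (r ++ [' ']) [] := by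
        simp [pvG]
      rw [hg, ih []]
      rw [show (pvSplit (r.flatMap pvF)).modifyHead (fun q : List Char => [] ++ q)
          = pvSplit (r.flatMap pvF) from by
        rw [show (fun q : List Char => [] ++ q) = (fun q => q) from by funext q; simp]
        exact pv_modifyHead_trivial _]
      simp only [List.modifyHead_cons, pv_filterMap_cons]
      rw [show pvFl ['('] = [['(']] from by decide]
      simp
    · by_cases h2 : c = ')'
      · subst h2
        have hsp : pvSplit ((')' :: r).flatMap pvF) = [] :: [')'] :: pvSplit (r.flatMap pvF) := by
          simp [pvF, pvSplit]
        rw [hsp]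
        have hg : pvG ((')' :: r) ++ [' ']) cur
            = pvFl cur ++ [[')']] ++ pvG (r ++ [' ']) [] := by
          simp [pvG]
        rw [hg, ih []]
        rw [show (pvSplit (r.flatMap pvF)).modifyHead (fun q : List Char => [] ++ q)
            = pvSplit (r.flatMap pvF) from by
          rw [show (fun q : List Char => [] ++ q) = (fun q => q) from by funext q; simp]
          exact pv_modifyHead_trivial _]
        simp only [List.modifyHead_cons, pv_filterMap_cons]
        rw [show pvFl [')'] = [[')']] from by decide]
        simp
      · by_cases h3 : c = ' '
        · subst h3
          have hsp : pvSplit ((' ' :: r).flatMap pvF) = [] :: pvSplit (r.flatMap pvF) := by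
            simp [pvF, pvSplit]
          rw [hsp]
          have hg : pvG ((' ' :: r) ++ [' ']) cur = pvFl cur ++ pvG (r ++ [' ']) [] := by
            simp [pvG]
          rw [hg, ih []]
          rw [show (pvSplit (r.flatMap pvF)).modifyHead (fun q : List Char => [] ++ q)
              = pvSplit (r.flatMap pvF) from by
            rw [show (fun q : List Char => [] ++ q) = (fun q => q) from by funext q; simp]
            exact pv_modifyHead_trivial _]
          simp only [List.modifyHead_cons, pv_filterMap_cons]
          simp
        · have hsp : pvSplit ((c :: r).flatMap pvF)
              = (pvSplit (r.flatMap pvF)).modifyHead (c :: ·) := by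
            simp [pvF, h1, h2, pvSplit, h3]
          rw [hsp, List.modifyHead_modifyHead]
          have hg : pvG ((c :: r) ++ [' ']) cur = pvG (r ++ [' ']) (cur ++ [c]) := by
            simp [pvG, h1, h2, h3]
          rw [hg, ih (cur ++ [c])]
          congr 2
          funext q
          simp

-- ---------- B's emit loop ----------

theorem pv_emitB : ∀ (ts : List (List Char)) (parts : List (List Char)) (prev : List Char),
    parts ≠ [] →
    ((ts.foldl pvEmitStep (parts, prev)).1).flatten = parts.flatten ++ pvEmitR prev ts := by
  intro ts
  induction ts with
  | nil => intro parts prev _; simp [pvEmitR]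
  | cons t r ih =>
    intro parts prev hp
    simp only [List.foldl_cons]
    by_cases hc : t = [')'] ∨ prev = ['(']
    · rw [show pvEmitStep (parts, prev) t = (parts ++ [pvWrap t], t) from by
        unfold pvEmitStep
        rw [if_neg (by rintro ⟨_, hc1, hc2⟩; rcases hc with h | h; exacts [hc1 h, hc2 h])]]
      rw [ih (parts ++ [pvWrap t]) t (by simp)]
      simp [pvEmitR, hc]
    · have hc1 : t ≠ [')'] := fun h => hc (Or.inl h)
      have hc2 : prev ≠ ['('] := fun h => hc (Or.inr h)
      rw [show pvEmitStep (parts, prev) t = (parts ++ [[' ']] ++ [pvWrap t], t) from by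
        unfold pvEmitStep
        rw [if_pos ⟨hp, hc1, hc2⟩]]
      rw [ih (parts ++ [[' ']] ++ [pvWrap t]) t (by simp)]
      simp [pvEmitR, hc]

-- ---------- bridge: raw-level emission = wrapped-level spacing ----------

theorem pv_wrap_eq_rparen (t : List Char) : pvWrap t = [')'] ↔ t = [')'] := by
  unfold pvWrap
  by_cases hop : t = [')'] ∨ t = ['('] ∨ t = "or".toList ∨ t = "and".toList ∨ t = "OR".toList ∨ t = "AND".toList
  · rw [if_pos hop]
  · rw [if_neg hop]
    constructor
    · intro h
      exfalso
      have hlen := congrArg List.length h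
      have hlit : ("<span class='fw-semibold'>".toList).length = 26 := by decide
      have hlit2 : ("</span>".toList).length = 7 := by decide
      simp only [List.length_append, hlit, hlit2, List.length_cons, List.length_nil] at hlen
      omega
    · intro h; exact absurd (Or.inl h) hop

theorem pv_wrap_eq_lparen (t : List Char) : pvWrap t = ['('] ↔ t = ['('] := by
  unfold pvWrap
  by_cases hop : t = [')'] ∨ t = ['('] ∨ t = "or".toList ∨ t = "and".toList ∨ t = "OR".toList ∨ t = "AND".toList
  · rw [if_pos hop]
  · rw [if_neg hop]
    constructor
    · intro h
      exfalso
      have hlen := congrArg List.length h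
      have hlit : ("<span class='fw-semibold'>".toList).length = 26 := by decide
      have hlit2 : ("</span>".toList).length = 7 := by decide
      simp only [List.length_append, hlit, hlit2, List.length_cons, List.length_nil] at hlen
      omega
    · intro h; exact absurd (Or.inr (Or.inl h)) hop

theorem pv_emit_hh : ∀ (r : List (List Char)) (prev : List Char),
    pvEmitR prev r = pvHH (pvWrap prev) (r.map pvWrap) := by
  intro r
  induction r with
  | nil => intro prev; rfl
  | cons t r' ih =>
    intro prev
    simp only [List.map_cons]
    have hcond : (pvWrap t = [')'] ∨ pvWrap prev = ['(']) ↔ (t = [')'] ∨ prev = ['(']) := by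
      rw [pv_wrap_eq_rparen, pv_wrap_eq_lparen]
    by_cases hc : t = [')'] ∨ prev = ['(']
    · rw [show pvEmitR prev (t :: r') = pvWrap t ++ pvEmitR t r' from by simp [pvEmitR, hc]]
      rw [show pvHH (pvWrap prev) (pvWrap t :: r'.map pvWrap)
          = pvWrap t ++ pvHH (pvWrap t) (r'.map pvWrap) from by
        simp [pvHH, hcond.mpr hc]]
      rw [ih]
    · rw [show pvEmitR prev (t :: r') = (' ' :: pvWrap t) ++ pvEmitR t r' from by
        simp [pvEmitR, hc]]
      rw [show pvHH (pvWrap prev) (pvWrap t :: r'.map pvWrap)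
          = (' ' :: pvWrap t) ++ pvHH (pvWrap t) (r'.map pvWrap) from by
        rw [show pvHH (pvWrap prev) (pvWrap t :: r'.map pvWrap)
            = (if pvWrap t = [')'] ∨ pvWrap prev = ['('] then pvWrap t else ' ' :: pvWrap t)
              ++ pvHH (pvWrap t) (r'.map pvWrap) from rfl]
        rw [if_neg (fun hx => hc (hcond.mp hx))]]
      rw [ih]

-- ===== VERDICT (by name: the statement is the Claim_ definition above) =====
theorem format_gene_reaction_rule_spec : Claim_equal_format_gene_reaction_rule := by
  intro grr _
  unfold Spec_format_gene_reaction_rule format_gene_reaction_rule format_gene_reaction_rule_alt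
  simp only [pv_pad_eq, pv_split_eq]
  rw [show (fun x => let xs := PySem.Chars.strip x; if xs = [] then none else some xs) = pvFstrip from rfl]
  rw [show (fun x => if x = [')'] ∨ x = ['('] ∨ x = "or".toList ∨ x = "and".toList ∨ x = "OR".toList ∨ x = "AND".toList
      then x else "<span class='fw-semibold'>".toList ++ x ++ "</span>".toList) = pvWrap from rfl]
  rw [pv_scanB, pv_scan_split]
  rw [show (fun q : List Char => ([] : List Char) ++ q) = (fun q => q) from by funext q; simp]
  rw [pv_modifyHead_trivial]
  have hraw := pv_tok_raw grr.toList
  generalize hR : (pvSplit (grr.toList.flatMap pvF)).filterMap pvFstrip = raw at hraw ⊢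
  have hgood : ∀ w ∈ raw.map pvWrap, pvGoodTok w := by
    intro w hw
    rw [List.mem_map] at hw
    obtain ⟨x, hx, rfl⟩ := hw
    exact pv_wrap_good x (hraw x hx)
  cases raw with
  | nil => decide
  | cons t r =>
    have hgt : pvGoodTok (pvWrap t) := hgood (pvWrap t) (by simp)
    simp only [List.map_cons, List.foldl_cons, List.nil_append]
    rw [show (if pvWrap t = [')'] ∨ ([' '] : List Char).getLast? = some ' '
          ∨ ([' '] : List Char).getLast? = some '('
        then [' '] ++ pvWrap t else [' '] ++ ' ' :: pvWrap t) = [' '] ++ pvWrap t from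
      if_pos (Or.inr (Or.inl rfl))]
    rw [pv_foldA (r.map pvWrap) (pvWrap t) ([' '] ++ pvWrap t)
      (fun u hu => hgood u (by simp [hu])) hgt (by simp)
      (pv_getLast?_append _ _ hgt.1)]
    rw [show ([' '] ++ pvWrap t) ++ pvHH (pvWrap t) (r.map pvWrap)
        = ' ' :: pvGG (pvWrap t :: r.map pvWrap) from by simp [pvGG]]
    rw [pv_strip_space_gg (pvWrap t :: r.map pvWrap) hgood]
    rw [show pvEmitStep (([] : List (List Char)), ([] : List Char)) t = ([pvWrap t], t) from by
      unfold pvEmitStep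
      rw [if_neg (by rintro ⟨h, _, _⟩; exact h rfl)]
      simp]
    rw [pv_emitB r [pvWrap t] t (by simp)]
    rw [pv_emit_hh]
    simp [pvGG]
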